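-- pv_equiv track=rewrite | github.com/Matixx22/dnaSteg | src/utils.py | bin_to_dna
-- ===== SOURCE A (Python) =====
-- from textwrap import wrap
--
-- num_to_dna = {
--     0: 'A',
--     1: 'C',
--     2: 'G',
--     3: 'T'
-- }
--
-- def bin_to_dna(binary):
--     result_list = []
--
--     bin_str_list = wrap(binary, 6)
--
--     for i in range(len(bin_str_list)):
--         one_letter_bin = wrap(bin_str_list[i], 2)
--
--         for b in one_letter_bin:
--             result_list.append(int(b, 2))
--
--     dna = ''.join([num_to_dna[num] for num in result_list])
--
--     return dna
-- ===== SOURCE B (Python) =====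
-- num_to_dna = {
--     0: 'A',
--     1: 'C',
--     2: 'G',
--     3: 'T'
-- }
--
-- def bin_to_dna(binary):
--     letters = []
--     for word in binary.split():
--         while word:
--             letters.append(num_to_dna[int(word[:2], 2)])
--             word = word[2:]
--     return ''.join(letters)
-- ===== Notes on version B (the rewrite author's own statement) =====
-- stated objective: simpler
-- what changed: Replaced A's nested textwrap.wrap(binary,6)/wrap(chunk,2) grouping and intermediate number list with a split() over whitespace and a single while loop slicing each word two characters at a time, joining the letters directly.
-- outside the precondition, e.g. on bin_to_dna('-0'): A returns 'A', B returns 'A'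
import Mathlib
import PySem

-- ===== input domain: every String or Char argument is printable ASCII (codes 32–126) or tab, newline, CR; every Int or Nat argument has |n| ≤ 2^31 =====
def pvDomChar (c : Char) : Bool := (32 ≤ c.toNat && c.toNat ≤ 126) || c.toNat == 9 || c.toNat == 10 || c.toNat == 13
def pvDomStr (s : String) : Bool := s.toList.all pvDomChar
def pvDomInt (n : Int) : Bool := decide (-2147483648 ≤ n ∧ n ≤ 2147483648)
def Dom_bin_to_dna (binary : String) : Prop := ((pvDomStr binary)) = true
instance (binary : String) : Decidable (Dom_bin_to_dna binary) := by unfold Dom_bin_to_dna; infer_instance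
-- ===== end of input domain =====

-- B drops A's nested textwrap.wrap(…,6)/wrap(…,2) grouping and intermediate number list for one
-- direct two-characters-at-a-time pass over each whitespace-separated word (objective: simpler).

-- shared module-level constant num_to_dna (both Pythons use the same dict)
def num_to_dna : PySem.Dict Int String := PySem.Dict.ofList [(0, "A"), (1, "C"), (2, "G"), (3, "T")]

-- int(b, 2): exact for nonempty strings of '0'/'1' digits (the only chunks reached under Pre_)
def pyIntBin (l : List Char) : Int :=
  l.foldl (fun acc c => acc * 2 + (if c = '1' then 1 else 0)) 0

-- num_to_dna[num]: KeyError impossible under Pre_ (num ∈ {0,1,2,3}), so the default "" is never used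
def dnaLetter (n : Int) : String := PySem.Dict.getD num_to_dna n ""

-- ===== PORT A =====
-- width-w chunker (accumulator form): cur holds the current chunk reversed, k its remaining capacity
def pvWrapGo (w : Nat) : List Char → Nat → List Char → List (List Char)
  | [], _, cur => if cur.isEmpty then [] else [cur.reverse]
  | c :: rest, 0, cur => cur.reverse :: pvWrapGo w rest (w - 1) [c]
  | c :: rest, k + 1, cur => pvWrapGo w rest k (c :: cur)

-- textwrap.wrap(s, w): exact on Pre_'s inputs — for whitespace-only (or empty) input textwrap drops
-- everything and returns []; for whitespace-free input it chunks into width-w pieces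
def pvWrap (w : Nat) (l : List Char) : List (List Char) :=
  if l.all PySem.Chars.isspace then [] else pvWrapGo w l w []

def bin_to_dna (binary : String) : String :=
  PySem.Str.join ""
    (((pvWrap 6 binary.toList).foldl (fun acc s =>
        (pvWrap 2 s).foldl (fun a b => a ++ [pyIntBin b]) acc) []).map
      (fun num => dnaLetter num))

-- ===== PORT B =====
-- the inner 'while word:' loop of Source B: chunk = word[:2], then word = word[2:]
def bAltLoop : List Char → List String → List String
  | [], letters => letters
  | [c], letters => letters ++ [dnaLetter (pyIntBin [c])]
  | c :: d :: rest, letters => bAltLoop rest (letters ++ [dnaLetter (pyIntBin [c, d])])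

-- outer loop: for word in binary.split()
def bin_to_dna_alt (binary : String) : String :=
  PySem.Str.join "" ((PySem.Chars.split₀ binary.toList).foldl (fun letters w => bAltLoop w letters) [])

-- ===== PRECONDITION & SPEC =====
-- Pre_ admits pure-'0'/'1' strings and whitespace-only strings; it excludes every other string:
-- on most of them A raises ValueError from int(b, 2), and on the remaining mixed whitespace/sign
-- inputs A's value is an accident of textwrap's whitespace munging (B's per-word value may differ).
def Pre_bin_to_dna (binary : String) : Prop :=
  (binary.toList.all (fun c => c == '0' || c == '1')) = true ∨
  (binary.toList.all PySem.Chars.isspace) = true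
instance (binary : String) : Decidable (Pre_bin_to_dna binary) := by unfold Pre_bin_to_dna; infer_instance

def pvWitness_bin_to_dna : String := "0111001"

def Spec_bin_to_dna (binary : String) (out : String) : Prop := out = bin_to_dna_alt binary
instance (binary : String) (out : String) : Decidable (Spec_bin_to_dna binary out) := by unfold Spec_bin_to_dna; infer_instance

-- ===== CLAIM (what is proved, stated in full; the proofs are below) =====
def Claim_equal_bin_to_dna : Prop := ∀ (binary : String), Dom_bin_to_dna binary → Pre_bin_to_dna binary → Spec_bin_to_dna binary (bin_to_dna binary)

-- ===== LEMMAS AND PROOFS =====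

-- proof-side width-w chunker in take/drop form
def chunkW (w : Nat) (l : List Char) : List (List Char) :=
  match w, l with
  | _, [] => []
  | 0, _ => []
  | w' + 1, c :: rest => ((c :: rest).take (w' + 1)) :: chunkW (w' + 1) ((c :: rest).drop (w' + 1))
termination_by l.length
decreasing_by simp

theorem chunkW_nil (w : Nat) : chunkW w [] = [] := by
  rw [chunkW.eq_def]

theorem chunkW_cons (w : Nat) (c : Char) (rest : List Char) :
    chunkW (w + 1) (c :: rest) =
      ((c :: rest).take (w + 1)) :: chunkW (w + 1) ((c :: rest).drop (w + 1)) := by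
  rw [chunkW.eq_def]

theorem pvWrapGo_eq (w : Nat) (hw : 1 ≤ w) :
    ∀ (l : List Char) (k : Nat) (cur : List Char), k ≤ w → (k = w ∨ cur ≠ []) →
      (cur ≠ [] ∨ l ≠ []) →
      pvWrapGo w l k cur = (cur.reverse ++ l.take k) :: chunkW w (l.drop k)
  | [], k, cur, _, _, hne => by
      have hcur : cur ≠ [] := by
        rcases hne with h | h
        · exact h
        · exact absurd rfl h
      rw [pvWrapGo, if_neg (by simpa using hcur)]
      simp [chunkW_nil]
  | c :: rest, 0, cur, hk, H, _ => by
      have hcur : cur ≠ [] := by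
        rcases H with h | h
        · omega
        · exact h
      obtain ⟨w', rfl⟩ : ∃ w', w = w' + 1 := ⟨w - 1, by omega⟩
      rw [pvWrapGo,
        pvWrapGo_eq (w' + 1) hw rest (w' + 1 - 1) [c] (by omega) (Or.inr (by simp))
          (Or.inl (by simp))]
      simp only [Nat.add_sub_cancel, List.take_zero, List.drop_zero, List.append_nil]
      rw [chunkW_cons w' c rest]
      simp
  | c :: rest, k + 1, cur, hk, H, _ => by
      rw [pvWrapGo,
        pvWrapGo_eq w hw rest k (c :: cur) (by omega) (Or.inr (by simp)) (Or.inl (by simp))]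
      simp

theorem pvWrap_eq_chunkW (w : Nat) (l : List Char) (hw : 1 ≤ w)
    (hns : l.all PySem.Chars.isspace = false) : pvWrap w l = chunkW w l := by
  match l with
  | [] => simp at hns
  | c :: rest =>
      rw [pvWrap, if_neg (by simp [hns]),
        pvWrapGo_eq w hw (c :: rest) w [] le_rfl (Or.inl rfl) (Or.inr (by simp))]
      obtain ⟨w', rfl⟩ : ∃ w', w = w' + 1 := ⟨w - 1, by omega⟩
      rw [chunkW_cons]
      simp

theorem pvWrap_of_ws (w : Nat) (l : List Char) (h : l.all PySem.Chars.isspace = true) :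
    pvWrap w l = [] := by
  rw [pvWrap, if_pos h]

theorem chunk2_cons2 (x y : Char) (r : List Char) :
    chunkW 2 (x :: y :: r) = [x, y] :: chunkW 2 r := by
  rw [show (2 : Nat) = 1 + 1 from rfl, chunkW_cons]
  simp

-- chunkW 2 distributes over ++ when the left part has even length
theorem chunk2_append (a b : List Char) (h : a.length % 2 = 0) :
    chunkW 2 (a ++ b) = chunkW 2 a ++ chunkW 2 b := by
  match a with
  | [] => simp [chunkW_nil]
  | [x] => simp at h
  | x :: y :: r =>
      rw [List.cons_append, List.cons_append, chunk2_cons2, chunk2_cons2,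
        chunk2_append r b (by simp at h; omega)]
      simp
termination_by a.length

-- the nested wrap-6 / wrap-2 chunking equals direct wrap-2 chunking
theorem chunk6_flat (l : List Char) : (chunkW 6 l).flatMap (chunkW 2) = chunkW 2 l := by
  match l with
  | [] => simp [chunkW_nil]
  | c :: rest =>
      rw [show (6 : Nat) = 5 + 1 from rfl, chunkW_cons]
      rw [List.flatMap_cons, chunk6_flat ((c :: rest).drop (5 + 1))]
      by_cases h : (c :: rest).length ≤ 6
      · rw [List.drop_eq_nil_of_le (by omega), List.take_of_length_le (by omega)]
        simp [chunkW_nil]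
      · have h6 : ((c :: rest).take 6).length % 2 = 0 := by
          rw [List.length_take]
          simp at h ⊢
          omega
        rw [← chunk2_append _ _ h6, List.take_append_drop]
termination_by l.length
decreasing_by simp

-- every chunk is a nonempty sublist of the input
theorem mem_chunkW (w : Nat) (l : List Char) (s : List Char) (hs : s ∈ chunkW w l) :
    s ≠ [] ∧ ∀ c ∈ s, c ∈ l := by
  match w, l with
  | w, [] => rw [chunkW_nil] at hs; simp at hs
  | 0, c :: rest => rw [chunkW.eq_def] at hs; simp at hs
  | w' + 1, c :: rest =>
      rw [chunkW_cons] at hs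
      rcases List.mem_cons.mp hs with h | h
      · subst h
        exact ⟨by simp, fun x hx => List.mem_of_mem_take hx⟩
      · obtain ⟨hne, hsub⟩ := mem_chunkW (w' + 1) ((c :: rest).drop (w' + 1)) s h
        exact ⟨hne, fun x hx => List.mem_of_mem_drop (hsub x hx)⟩
termination_by l.length
decreasing_by simp

theorem foldl_app_int (ys : List (List Char)) (acc : List Int) :
    ys.foldl (fun a b => a ++ [pyIntBin b]) acc = acc ++ ys.map pyIntBin := by
  induction ys generalizing acc with
  | nil => simp
  | cons y ys ih => simp [List.foldl_cons, ih]

theorem foldl_outer (xs : List (List Char)) (init : List Int) :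
    xs.foldl (fun acc s => (pvWrap 2 s).foldl (fun a b => a ++ [pyIntBin b]) acc) init
      = init ++ xs.flatMap (fun s => (pvWrap 2 s).map pyIntBin) := by
  induction xs generalizing init with
  | nil => simp
  | cons x xs ih =>
      rw [List.foldl_cons, foldl_app_int, ih, List.flatMap_cons, List.append_assoc]

theorem bAltLoop_eq (l : List Char) (letters : List String) :
    bAltLoop l letters = letters ++ (chunkW 2 l).map (fun b => dnaLetter (pyIntBin b)) := by
  match l with
  | [] => rw [bAltLoop, chunkW_nil]; simp
  | [c] =>
      rw [bAltLoop, show (2 : Nat) = 1 + 1 from rfl, chunkW_cons]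
      simp [chunkW_nil]
  | c :: d :: rest =>
      rw [bAltLoop, bAltLoop_eq rest _, chunk2_cons2]
      simp

-- str.split(): whitespace-only (or empty) input gives no words
theorem split0_go_ws (l cur : List Char) (acc : List (List Char))
    (h : ∀ c ∈ l, PySem.Chars.isspace c = true) :
    PySem.Chars.split₀.go l cur acc =
      if cur.isEmpty then acc.reverse else (cur.reverse :: acc).reverse := by
  induction l generalizing cur acc with
  | nil => rw [PySem.Chars.split₀.go]
  | cons c rest ih =>
      rw [PySem.Chars.split₀.go, if_pos (h c (by simp))]
      by_cases hcur : cur.isEmpty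
      · rw [if_pos hcur, ih _ _ (fun x hx => h x (by simp [hx]))]
        simp [hcur]
      · rw [if_neg hcur, ih _ _ (fun x hx => h x (by simp [hx]))]
        simp [hcur]

theorem split0_ws (l : List Char) (h : ∀ c ∈ l, PySem.Chars.isspace c = true) :
    PySem.Chars.split₀ l = [] := by
  rw [PySem.Chars.split₀, split0_go_ws l [] [] h]
  simp

-- str.split(): whitespace-free input is a single word
theorem split0_go_nows (l cur : List Char) (acc : List (List Char))
    (h : ∀ c ∈ l, PySem.Chars.isspace c = false) :
    PySem.Chars.split₀.go l cur acc =
      if (cur.reverse ++ l).isEmpty then acc.reverse else ((cur.reverse ++ l) :: acc).reverse := by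
  induction l generalizing cur acc with
  | nil => rw [PySem.Chars.split₀.go]; simp
  | cons c rest ih =>
      rw [PySem.Chars.split₀.go, if_neg (by simp [h c (by simp)])]
      rw [ih _ _ (fun x hx => h x (by simp [hx]))]
      simp

theorem split0_nows (l : List Char) (hne : l ≠ [])
    (h : ∀ c ∈ l, PySem.Chars.isspace c = false) :
    PySem.Chars.split₀ l = [l] := by
  rw [PySem.Chars.split₀, split0_go_nows l [] [] h]
  simp [hne]

theorem zero_one_not_space (c : Char) (h : (c == '0' || c == '1') = true) :
    PySem.Chars.isspace c = false := by
  rcases Bool.or_eq_true_iff.mp h with h0 | h0 <;>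
    · rw [beq_iff_eq] at h0
      subst h0
      decide

-- ===== VERDICT (by name: the statement is the Claim_ definition above) =====
theorem bin_to_dna_spec : Claim_equal_bin_to_dna := by
  intro binary _ hpre
  unfold Spec_bin_to_dna bin_to_dna bin_to_dna_alt
  rcases hpre with h01 | hws
  · have hns : ∀ c ∈ binary.toList, PySem.Chars.isspace c = false := by
      intro c hc
      exact zero_one_not_space c (List.all_eq_true.mp h01 c hc)
    by_cases hnil : binary.toList = []
    · rw [hnil, split0_ws [] (by simp), pvWrap_of_ws 6 [] (by simp)]
      simp
    · have hall : binary.toList.all PySem.Chars.isspace = false := by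
        obtain ⟨c, rest, hcr⟩ := List.exists_cons_of_ne_nil hnil
        rw [List.all_eq_false]
        exact ⟨c, by rw [hcr]; simp, by simp [hns c (by rw [hcr]; simp)]⟩
      rw [split0_nows binary.toList hnil hns, List.foldl_cons, List.foldl_nil,
        bAltLoop_eq binary.toList [], foldl_outer,
        pvWrap_eq_chunkW 6 binary.toList (by omega) hall]
      have hcongr :
          (chunkW 6 binary.toList).flatMap (fun s => (pvWrap 2 s).map pyIntBin)
            = (chunkW 6 binary.toList).flatMap (fun s => (chunkW 2 s).map pyIntBin) := by
        rw [List.flatMap_eq_foldl, List.flatMap_eq_foldl]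
        apply PySem.List.foldl_congr_mem
        intro acc s hs
        obtain ⟨hne, hsub⟩ := mem_chunkW 6 binary.toList s hs
        have : s.all PySem.Chars.isspace = false := by
          obtain ⟨c, rest, hcr⟩ := List.exists_cons_of_ne_nil hne
          rw [List.all_eq_false]
          exact ⟨c, by rw [hcr]; simp,
            by simp [hns c (hsub c (by rw [hcr]; simp))]⟩
        rw [pvWrap_eq_chunkW 2 s (by omega) this]
      rw [hcongr]
      have : (chunkW 6 binary.toList).flatMap (fun s => (chunkW 2 s).map pyIntBin)
          = ((chunkW 6 binary.toList).flatMap (chunkW 2)).map pyIntBin := by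
        rw [List.map_flatMap]
      rw [this, chunk6_flat binary.toList]
      simp [List.map_map, Function.comp_def]
  · rw [split0_ws binary.toList (List.all_eq_true.mp hws),
      pvWrap_of_ws 6 binary.toList hws]
    simp
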